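-- pv_equiv track=rewrite | github.com/sola8/PCL | wild_poke_gen/stat_grab.py | grab
-- ===== SOURCE A (Python) =====
-- def grab(stats, wild_poke):
--     for poke in wild_poke:
--         for t in poke:
--             stats[0].append(t[0]+"/"+t[1]) # Figure out a way to remove the '/' if
--                                          # pokemon has single-typing
--             stats[1].append("("+t[2]+")")
--             stats[2].append(t[3])
--             stats[3].append((t[6]))
--             stats[4].append(t[7])
--             stats[5].append(t[8])
--             stats[6].append(t[9])
--             stats[7].append(t[10])
--             stats[8].append(t[11])
--             stats[9].append(t[12])
--             stats[10].append(t[13])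
--             stats[11].append(t[14])
--             stats[12].append(t[15])
--             stats[13].append(t[16])
--             stats[14].append(t[17])
--             stats[15].append(t[18])
--             stats[16].append(t[19])
--             stats[17].append(t[20])
--             stats[18].append(t[21])
--             stats[19].append(t[22])
--             stats[20].append(t[23])
--             stats[21].append(t[24])
--     return stats
-- ===== SOURCE B (Python) =====
-- def grab(stats, wild_poke):
--     # Flatten once, then fill each stat list with one column-wise extend.
--     rows = [t for poke in wild_poke for t in poke]
--     if not rows:
--         return stats
--     stats[0].extend(t[0] + "/" + t[1] for t in rows)
--     stats[1].extend("(" + t[2] + ")" for t in rows)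
--     stats[2].extend(t[3] for t in rows)
--     for i in range(3, 22):
--         stats[i].extend(t[i + 3] for t in rows)
--     return stats
-- ===== Notes on version B (the rewrite author's own statement) =====
-- stated objective: alternative
-- what changed: The row-major nested loop doing 22 appends per tuple is replaced by flattening wild_poke once and filling each of the 22 stat lists with a single column-wise extend over the flattened rows.
import Mathlib
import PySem

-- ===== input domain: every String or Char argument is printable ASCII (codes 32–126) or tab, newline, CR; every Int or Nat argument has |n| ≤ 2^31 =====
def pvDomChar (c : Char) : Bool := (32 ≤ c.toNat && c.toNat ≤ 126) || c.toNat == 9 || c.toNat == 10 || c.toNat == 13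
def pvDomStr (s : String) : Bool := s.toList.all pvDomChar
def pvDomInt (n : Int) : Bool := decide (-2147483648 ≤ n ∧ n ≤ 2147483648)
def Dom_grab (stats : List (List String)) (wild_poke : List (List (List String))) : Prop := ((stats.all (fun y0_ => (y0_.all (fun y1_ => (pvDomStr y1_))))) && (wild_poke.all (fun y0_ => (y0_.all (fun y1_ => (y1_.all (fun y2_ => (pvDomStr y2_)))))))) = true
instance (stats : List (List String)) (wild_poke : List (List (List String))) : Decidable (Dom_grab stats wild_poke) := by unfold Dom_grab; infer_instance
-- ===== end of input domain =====

-- B flattens wild_poke once and fills each stat list with one column-wise extend, instead of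
-- A's row-major nested loop with 22 appends per tuple (alternative decomposition, same O(n) cost).
-- Both A and B mutate the lists inside `stats` in place in Python with the same net effect on
-- inputs satisfying Pre_; the equivalence proved here is about the return value.

-- ===== PORT A =====
-- stats[i].append(v): exact for i < stats.length; Python raises IndexError for larger i
-- (excluded by Pre_grab), where this helper is a no-op.
def appendAt (s : List (List String)) (i : Nat) (v : String) : List (List String) :=
  s.set i (s.getD i [] ++ [v])

-- body of the inner 'for t in poke' loop: the 22 appends, in A's order
-- (t[j]: exact for j < t.length; Python raises IndexError otherwise, excluded by Pre_grab)
def stepA (s : List (List String)) (t : List String) : List (List String) :=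
  let s := appendAt s 0 (t.getD 0 "" ++ "/" ++ t.getD 1 "")
  let s := appendAt s 1 ("(" ++ t.getD 2 "" ++ ")")
  let s := appendAt s 2 (t.getD 3 "")
  let s := appendAt s 3 (t.getD 6 "")
  let s := appendAt s 4 (t.getD 7 "")
  let s := appendAt s 5 (t.getD 8 "")
  let s := appendAt s 6 (t.getD 9 "")
  let s := appendAt s 7 (t.getD 10 "")
  let s := appendAt s 8 (t.getD 11 "")
  let s := appendAt s 9 (t.getD 12 "")
  let s := appendAt s 10 (t.getD 13 "")
  let s := appendAt s 11 (t.getD 14 "")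
  let s := appendAt s 12 (t.getD 15 "")
  let s := appendAt s 13 (t.getD 16 "")
  let s := appendAt s 14 (t.getD 17 "")
  let s := appendAt s 15 (t.getD 18 "")
  let s := appendAt s 16 (t.getD 19 "")
  let s := appendAt s 17 (t.getD 20 "")
  let s := appendAt s 18 (t.getD 21 "")
  let s := appendAt s 19 (t.getD 22 "")
  let s := appendAt s 20 (t.getD 23 "")
  let s := appendAt s 21 (t.getD 24 "")
  s

def grab (stats : List (List String)) (wild_poke : List (List (List String))) : List (List String) :=
  wild_poke.foldl (fun s poke => poke.foldl stepA s) stats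

-- ===== PORT B =====
-- stats[i].extend(vs): exact for i < stats.length (IndexError otherwise, excluded by Pre_grab)
def extendAt (s : List (List String)) (i : Nat) (vs : List String) : List (List String) :=
  s.set i (s.getD i [] ++ vs)

def grab_alt (stats : List (List String)) (wild_poke : List (List (List String))) : List (List String) :=
  let rows := wild_poke.flatMap id
  if rows.isEmpty then stats
  else
    let s := extendAt stats 0 (rows.map fun t => t.getD 0 "" ++ "/" ++ t.getD 1 "")
    let s := extendAt s 1 (rows.map fun t => "(" ++ t.getD 2 "" ++ ")")
    let s := extendAt s 2 (rows.map fun t => t.getD 3 "")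
    (PySem.List.pyRange 3 22 1).foldl
      (fun s i => extendAt s i.toNat (rows.map fun t => t.getD (i + 3).toNat "")) s

-- ===== PRECONDITION & SPEC =====
-- Pre_grab is exactly where Python A returns: every tuple must reach index 24, and stats must
-- have 22 lists unless no tuple exists at all (then A's loop body never runs).
def Pre_grab (stats : List (List String)) (wild_poke : List (List (List String))) : Prop :=
  (∀ poke ∈ wild_poke, ∀ t ∈ poke, 25 ≤ t.length) ∧
    (22 ≤ stats.length ∨ ∀ poke ∈ wild_poke, poke = [])
instance (stats : List (List String)) (wild_poke : List (List (List String))) : Decidable (Pre_grab stats wild_poke) := by unfold Pre_grab; infer_instance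

def pvWitness_grab : List (List String) × List (List (List String)) :=
  (List.replicate 22 [], [[List.replicate 25 "a"]])

def Spec_grab (stats : List (List String)) (wild_poke : List (List (List String))) (out : List (List String)) : Prop := out = grab_alt stats wild_poke
instance (stats : List (List String)) (wild_poke : List (List (List String))) (out : List (List String)) : Decidable (Spec_grab stats wild_poke out) := by unfold Spec_grab; infer_instance

-- ===== CLAIM (what is proved, stated in full; the proofs are below) =====
def Claim_equal_grab : Prop := ∀ (stats : List (List String)) (wild_poke : List (List (List String))), Dom_grab stats wild_poke → Pre_grab stats wild_poke → Spec_grab stats wild_poke (grab stats wild_poke)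

-- ===== LEMMAS AND PROOFS =====

-- column i of the table, as a function of one row
def colv (i : Nat) (t : List String) : String :=
  if i = 0 then t.getD 0 "" ++ "/" ++ t.getD 1 ""
  else if i = 1 then "(" ++ t.getD 2 "" ++ ")"
  else if i = 2 then t.getD 3 ""
  else t.getD (i + 3) ""

theorem range22_lit : List.range 22 = [0,1,2,3,4,5,6,7,8,9,10,11,12,13,14,15,16,17,18,19,20,21] := by decide

theorem pyRange_lit : PySem.List.pyRange 3 22 1 = [3,4,5,6,7,8,9,10,11,12,13,14,15,16,17,18,19,20,21] := by decide

theorem stepA_eq (s : List (List String)) (t : List String) :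
    stepA s t = (List.range 22).foldl (fun s i => extendAt s i [colv i t]) s := by
  rw [range22_lit]
  simp only [List.foldl_cons, List.foldl_nil]
  rfl

theorem grab_alt_eq (stats : List (List String)) (wild_poke : List (List (List String)))
    (h : (wild_poke.flatMap id).isEmpty = false) :
    grab_alt stats wild_poke =
      (List.range 22).foldl
        (fun s i => extendAt s i ((wild_poke.flatMap id).map (colv i))) stats := by
  simp only [grab_alt, h, Bool.false_eq_true, if_false]
  rw [pyRange_lit, range22_lit]
  simp only [List.foldl_cons, List.foldl_nil]
  rfl

theorem extendAt_oob (s : List (List String)) (i : Nat) (v : List String)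
    (h : s.length ≤ i) : extendAt s i v = s := by
  unfold extendAt; exact List.set_eq_of_length_le h

theorem getD_extendAt_ne (s : List (List String)) (i j : Nat) (v : List String) (hij : i ≠ j) :
    (extendAt s j v).getD i [] = s.getD i [] := by
  simp only [extendAt, List.getD_eq_getElem?_getD]
  rw [List.getElem?_set_ne (Ne.symm hij)]

theorem extendAt_nil (s : List (List String)) (i : Nat) : extendAt s i [] = s := by
  unfold extendAt
  by_cases h : i < s.length
  · simp [h]
  · exact List.set_eq_of_length_le (by omega)

theorem extendAt_length (s : List (List String)) (i : Nat) (v : List String) :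
    (extendAt s i v).length = s.length := by simp [extendAt]

theorem extendAt_extendAt_same (s : List (List String)) (i : Nat) (u v : List String) :
    extendAt (extendAt s i u) i v = extendAt s i (u ++ v) := by
  by_cases h : i < s.length
  · simp [extendAt, h, List.set_set]
  · have h' : s.length ≤ i := by omega
    rw [extendAt_oob s i u h', extendAt_oob s i v h', extendAt_oob s i (u ++ v) h']

theorem extendAt_comm (s : List (List String)) (i j : Nat) (u v : List String) (hij : i ≠ j) :
    extendAt (extendAt s i u) j v = extendAt (extendAt s j v) i u := by
  by_cases hi : s.length ≤ i
  · rw [extendAt_oob s i u hi,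
        extendAt_oob (extendAt s j v) i u (by rw [extendAt_length]; exact hi)]
  · by_cases hj : s.length ≤ j
    · rw [extendAt_oob s j v hj,
        extendAt_oob (extendAt s i u) j v (by rw [extendAt_length]; exact hj)]
    · show (extendAt s i u).set j ((extendAt s i u).getD j [] ++ v) =
        (extendAt s j v).set i ((extendAt s j v).getD i [] ++ u)
      rw [getD_extendAt_ne _ _ _ _ (Ne.symm hij), getD_extendAt_ne _ _ _ _ hij]
      show (s.set i _).set j _ = (s.set j _).set i _
      exact List.set_comm _ _ hij

theorem foldl_extendAt_out (L : List Nat) (f : Nat → List String) (s : List (List String))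
    (i : Nat) (v : List String) (h : i ∉ L) :
    L.foldl (fun s j => extendAt s j (f j)) (extendAt s i v) =
      extendAt (L.foldl (fun s j => extendAt s j (f j)) s) i v := by
  induction L generalizing s with
  | nil => rfl
  | cons j L ih =>
    simp only [List.mem_cons, not_or] at h
    simp only [List.foldl_cons]
    rw [extendAt_comm _ _ _ _ _ h.1, ih _ h.2]

theorem foldl_extendAt_nil (L : List Nat) (s : List (List String)) :
    L.foldl (fun s j => extendAt s j ([] : List String)) s = s := by
  induction L generalizing s with
  | nil => rfl
  | cons j L ih =>
    rw [List.foldl_cons, extendAt_nil]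
    exact ih s

theorem foldl_extendAt_split (L : List Nat) (g f : Nat → List String) (s : List (List String))
    (h : L.Nodup) :
    L.foldl (fun s j => extendAt s j (g j ++ f j)) s =
      L.foldl (fun s j => extendAt s j (f j)) (L.foldl (fun s j => extendAt s j (g j)) s) := by
  induction L generalizing s with
  | nil => rfl
  | cons i L ih =>
    simp only [List.foldl_cons]
    have hnd := List.nodup_cons.mp h
    rw [← extendAt_extendAt_same, foldl_extendAt_out L (fun j => g j ++ f j) _ i (f i) hnd.1,
        ih _ hnd.2, foldl_extendAt_out L f _ i (f i) hnd.1]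

theorem rows_fold (rows : List (List String)) (stats : List (List String)) :
    rows.foldl (fun s t => (List.range 22).foldl (fun s i => extendAt s i [colv i t]) s) stats =
      (List.range 22).foldl (fun s i => extendAt s i (rows.map (colv i))) stats := by
  induction rows generalizing stats with
  | nil =>
    rw [List.foldl_nil]
    simp only [List.map_nil]
    rw [foldl_extendAt_nil]
  | cons t rest ih =>
    simp only [List.foldl_cons, List.map_cons]
    rw [ih]
    have hfn : (fun (s : List (List String)) i => extendAt s i (colv i t :: rest.map (colv i))) =
        fun s i => extendAt s i ([colv i t] ++ rest.map (colv i)) := by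
      funext s i; rfl
    rw [hfn, foldl_extendAt_split _ _ _ _ List.nodup_range]

theorem grab_eq_rows_fold (stats : List (List String)) (wild_poke : List (List (List String))) :
    grab stats wild_poke = (wild_poke.flatMap id).foldl stepA stats := by
  unfold grab
  induction wild_poke generalizing stats with
  | nil => rfl
  | cons p rest ih => simp only [List.foldl_cons, List.flatMap_cons, id, List.foldl_append]; exact ih _

-- ===== VERDICT (by name: the statement is the Claim_ definition above) =====
theorem grab_spec : Claim_equal_grab := by
  intro stats wild_poke _ _
  unfold Spec_grab
  rw [grab_eq_rows_fold]
  cases h : (wild_poke.flatMap id).isEmpty with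
  | true =>
    have hrw := List.isEmpty_iff.mp h
    rw [hrw, List.foldl_nil]
    simp [grab_alt, hrw]
  | false =>
    rw [grab_alt_eq _ _ h]
    have hst : stepA = fun s t => (List.range 22).foldl (fun s i => extendAt s i [colv i t]) s := by
      funext s t; exact stepA_eq s t
    rw [hst, rows_fold]
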